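-- pv_equiv track=rewrite | github.com/cxygiao/Transmission-Cost-Optimization-Dynamic-Look-Ahead | Utils/transmission_cost_calculation_more.py | judge_is_same_partation
-- ===== SOURCE A (Python) =====
-- def judge_is_same_partation(transfer_qubit_i,transfer_qubit_j,cut_list):
--     partition_interval_list = []  # 分区区间 [[0,1],[2,3],[4,6]]
--     c = 0
--     o = 0
--     while c < len(cut_list):
--         # 生成区间
--         partition_interval_list.append([o, o + cut_list[c] - 1])
--         o = o + cut_list[c]
--         c += 1
--     for interval in partition_interval_list:
--         if interval[0] <= transfer_qubit_i <= interval[1] and interval[0] <= transfer_qubit_j <= interval[1]: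
--             return 1
--     return 0
-- ===== SOURCE B (Python) =====
-- def judge_is_same_partation(transfer_qubit_i, transfer_qubit_j, cut_list):
--     lo = min(transfer_qubit_i, transfer_qubit_j)
--     hi = max(transfer_qubit_i, transfer_qubit_j)
--     start = 0
--     for width in cut_list:
--         if start <= lo and hi < start + width:
--             return 1
--         start += width
--     return 0
-- ===== Notes on version B (the rewrite author's own statement) =====
-- stated objective: simpler
-- what changed: B never builds the interval list: it reduces the two qubits to their min and max once and makes a single O(1)-space pass over cut_list with a running start, returning 1 at the first width whose interval covers [min,max].
import Mathlib
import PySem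

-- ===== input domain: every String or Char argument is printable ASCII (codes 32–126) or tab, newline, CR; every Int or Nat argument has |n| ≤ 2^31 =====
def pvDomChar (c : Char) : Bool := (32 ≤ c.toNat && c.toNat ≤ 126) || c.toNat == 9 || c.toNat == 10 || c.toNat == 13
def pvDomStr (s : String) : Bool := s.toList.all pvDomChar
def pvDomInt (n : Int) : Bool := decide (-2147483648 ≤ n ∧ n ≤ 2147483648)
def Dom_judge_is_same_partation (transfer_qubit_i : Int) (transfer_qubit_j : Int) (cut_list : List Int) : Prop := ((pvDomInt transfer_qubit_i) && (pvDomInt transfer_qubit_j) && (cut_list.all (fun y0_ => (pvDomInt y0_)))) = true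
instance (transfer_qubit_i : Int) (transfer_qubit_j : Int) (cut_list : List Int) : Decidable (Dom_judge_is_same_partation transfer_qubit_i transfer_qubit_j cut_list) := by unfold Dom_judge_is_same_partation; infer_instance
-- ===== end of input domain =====

-- B replaces A's build-intervals-then-scan with a single O(1)-space pass over cut_list
-- that checks whether [min i j, max i j] fits in the current interval (objective: simpler).


-- ===== PORT A =====
-- while loop building partition_interval_list: state (o, remaining cuts), in order
def pvBuildIntervals (o : Int) : List Int → List (Int × Int)
  | [] => []
  | w :: ws => (o, o + w - 1) :: pvBuildIntervals (o + w) ws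

-- the for loop over the built intervals, returning at the first hit
def pvScanIntervals (i j : Int) : List (Int × Int) → Int
  | [] => 0
  | (a, b) :: rest =>
      if a ≤ i ∧ i ≤ b ∧ a ≤ j ∧ j ≤ b then 1 else pvScanIntervals i j rest

def judge_is_same_partation (transfer_qubit_i : Int) (transfer_qubit_j : Int) (cut_list : List Int) : Int :=
  pvScanIntervals transfer_qubit_i transfer_qubit_j (pvBuildIntervals 0 cut_list)

-- ===== PORT B =====
-- single pass: running start, test whether [lo, hi] fits in the current interval
def pvLocLoop (lo hi : Int) : Int → List Int → Int
  | _, [] => 0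
  | start, w :: ws =>
      if start ≤ lo ∧ hi < start + w then 1 else pvLocLoop lo hi (start + w) ws

def judge_is_same_partation_alt (transfer_qubit_i : Int) (transfer_qubit_j : Int) (cut_list : List Int) : Int :=
  pvLocLoop (min transfer_qubit_i transfer_qubit_j) (max transfer_qubit_i transfer_qubit_j) 0 cut_list

-- ===== PRECONDITION & SPEC =====
def Spec_judge_is_same_partation (transfer_qubit_i : Int) (transfer_qubit_j : Int) (cut_list : List Int) (out : Int) : Prop := out = judge_is_same_partation_alt transfer_qubit_i transfer_qubit_j cut_list
instance (transfer_qubit_i : Int) (transfer_qubit_j : Int) (cut_list : List Int) (out : Int) : Decidable (Spec_judge_is_same_partation transfer_qubit_i transfer_qubit_j cut_list out) := by unfold Spec_judge_is_same_partation; infer_instance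

-- ===== CLAIM (what is proved, stated in full; the proofs are below) =====
def Claim_equal_judge_is_same_partation : Prop := ∀ (transfer_qubit_i : Int) (transfer_qubit_j : Int) (cut_list : List Int), Dom_judge_is_same_partation transfer_qubit_i transfer_qubit_j cut_list → Spec_judge_is_same_partation transfer_qubit_i transfer_qubit_j cut_list (judge_is_same_partation transfer_qubit_i transfer_qubit_j cut_list)

-- ===== LEMMAS AND PROOFS =====
theorem pvScan_eq_loc (i j : Int) : ∀ (ws : List Int) (o : Int),
    pvScanIntervals i j (pvBuildIntervals o ws) = pvLocLoop (min i j) (max i j) o ws := by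
  intro ws
  induction ws with
  | nil => intro o; rfl
  | cons w ws ih =>
      intro o
      simp only [pvBuildIntervals, pvScanIntervals, pvLocLoop]
      have hcond : (o ≤ i ∧ i ≤ o + w - 1 ∧ o ≤ j ∧ j ≤ o + w - 1) ↔
          (o ≤ min i j ∧ max i j < o + w) := by omega
      rw [if_congr hcond rfl (ih (o + w))]

-- ===== VERDICT (by name: the statement is the Claim_ definition above) =====
theorem judge_is_same_partation_spec : Claim_equal_judge_is_same_partation := by
  intro i j cl _
  unfold Spec_judge_is_same_partation judge_is_same_partation judge_is_same_partation_alt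
  exact pvScan_eq_loc i j cl 0
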